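-- pv_equiv track=rewrite | github.com/DIG-Network/proof_research | sub-problems/verifier-oracle-model/experiments/adaptive-coordinate-or-triple-xor-tree-depth-wt-five-vs-six/script.py | build_triple_xor_partition_masks
-- ===== SOURCE A (Python) =====
-- N = 10
--
-- DOMAIN_SIZE = 462
--
-- def build_triple_xor_partition_masks(masks: list[int]) -> list[tuple[int, int]]:
--     """For each triple i<j<k: (xor3=0, xor3=1) as domain index bitmasks."""
--     full = (1 << DOMAIN_SIZE) - 1
--     out: list[tuple[int, int]] = []
--     for i in range(N):
--         for j in range(i + 1, N):
--             for k in range(j + 1, N):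
--                 b0 = 0
--                 for idx, m in enumerate(masks):
--                     bi = (m >> i) & 1
--                     bj = (m >> j) & 1
--                     bk = (m >> k) & 1
--                     if (bi ^ bj ^ bk) == 0:
--                         b0 |= 1 << idx
--                 b1 = full ^ b0
--                 out.append((b0, b1))
--     return out
-- ===== SOURCE B (Python) =====
-- N = 10
--
-- DOMAIN_SIZE = 462
--
-- def _col(masks, i):
--     c = 0
--     for idx, m in enumerate(masks):
--         c |= ((m >> i) & 1) << idx
--     return c
--
-- def _pair(local, full, c):
--     b0 = local ^ c
--     return (b0, full ^ b0)
--
-- def build_triple_xor_partition_masks(masks: list[int]) -> list[tuple[int, int]]: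
--     """Precompute per-bit column masks once; each triple is then three big-int XORs."""
--     full = (1 << DOMAIN_SIZE) - 1
--     local = (1 << len(masks)) - 1
--     cols = [_col(masks, i) for i in range(N)]
--     return [_pair(local, full, cols[i] ^ cols[j] ^ cols[k])
--             for i in range(N)
--             for j in range(i + 1, N)
--             for k in range(j + 1, N)]
-- ===== Notes on version B (the rewrite author's own statement) =====
-- stated objective: faster
-- what changed: Instead of scanning all masks inside each of the 120 (i,j,k) triples to build b0 bit by bit, B builds ten per-bit column bitmasks in one pass over the masks and computes each triple's partition as three big-int XORs (b0 = localmask ^ col[i] ^ col[j] ^ col[k], b1 = full ^ b0).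
import Mathlib
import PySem

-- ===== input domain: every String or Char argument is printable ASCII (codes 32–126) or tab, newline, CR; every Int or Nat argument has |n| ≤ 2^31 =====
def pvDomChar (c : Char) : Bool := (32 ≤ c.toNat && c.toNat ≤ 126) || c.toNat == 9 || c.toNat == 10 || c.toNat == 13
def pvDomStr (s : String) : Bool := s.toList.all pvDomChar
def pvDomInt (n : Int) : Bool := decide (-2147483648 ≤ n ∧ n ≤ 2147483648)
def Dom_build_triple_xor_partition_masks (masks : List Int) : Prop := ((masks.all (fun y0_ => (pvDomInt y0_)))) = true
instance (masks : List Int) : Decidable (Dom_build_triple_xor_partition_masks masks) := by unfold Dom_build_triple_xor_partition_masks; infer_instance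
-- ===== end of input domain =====

-- B replaces A's per-triple scan over all masks by ten per-bit column bitmasks built in one
-- pass, so each of the 120 triples is three big-int XORs (objective: faster, constant-factor).

-- ===== PORT A =====
-- (m >> b) & 1, exactly Python's arithmetic shift and bitwise and (b is a nonnegative loop index)
def pvBit (m b : Int) : Int := PySem.Int.band (m >>> b.toNat) 1

def build_triple_xor_partition_masks (masks : List Int) : List (Int × Int) :=
  let full : Int := (1 <<< (462 : Nat)) - 1
  (PySem.List.pyRange 0 10 1).foldl (fun out i =>
    (PySem.List.pyRange (i + 1) 10 1).foldl (fun out j =>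
      (PySem.List.pyRange (j + 1) 10 1).foldl (fun out k =>
        let b0 : Int := (PySem.List.enumerate masks 0).foldl (fun b0 p =>
          let bi := pvBit p.2 i
          let bj := pvBit p.2 j
          let bk := pvBit p.2 k
          if PySem.Int.bxor (PySem.Int.bxor bi bj) bk = 0 then
            PySem.Int.bor b0 (1 <<< p.1.toNat)
          else b0) 0
        let b1 := PySem.Int.bxor full b0
        out ++ [(b0, b1)]) out) out) ([] : List (Int × Int))

-- ===== PORT B =====
def pvCol (masks : List Int) (i : Int) : Int :=
  (PySem.List.enumerate masks 0).foldl (fun c p =>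
    PySem.Int.bor c ((pvBit p.2 i) <<< p.1.toNat)) 0

def pvPair (locl full c : Int) : Int × Int :=
  let b0 := PySem.Int.bxor locl c
  (b0, PySem.Int.bxor full b0)

def build_triple_xor_partition_masks_alt (masks : List Int) : List (Int × Int) :=
  let full : Int := (1 <<< (462 : Nat)) - 1
  let locl : Int := (1 <<< masks.length) - 1
  let cols : List Int := (PySem.List.pyRange 0 10 1).map (fun i => pvCol masks i)
  (PySem.List.pyRange 0 10 1).flatMap (fun i =>
    (PySem.List.pyRange (i + 1) 10 1).flatMap (fun j =>
      (PySem.List.pyRange (j + 1) 10 1).map (fun k =>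
        pvPair locl full
          (PySem.Int.bxor (PySem.Int.bxor (PySem.List.pyGetD cols i 0)
            (PySem.List.pyGetD cols j 0)) (PySem.List.pyGetD cols k 0)))))

-- ===== PRECONDITION & SPEC =====
def Spec_build_triple_xor_partition_masks (masks : List Int) (out : List (Int × Int)) : Prop := out = build_triple_xor_partition_masks_alt masks
instance (masks : List Int) (out : List (Int × Int)) : Decidable (Spec_build_triple_xor_partition_masks masks out) := by unfold Spec_build_triple_xor_partition_masks; infer_instance

-- ===== CLAIM (what is proved, stated in full; the proofs are below) =====
def Claim_equal_build_triple_xor_partition_masks : Prop := ∀ (masks : List Int), Dom_build_triple_xor_partition_masks masks → Spec_build_triple_xor_partition_masks masks (build_triple_xor_partition_masks masks)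

-- ===== LEMMAS AND PROOFS =====

-- Nat-level model of A's inner accumulation (bit t set iff mask t has xor3 = 0)
def pvFA (i j k : Int) : List Int → Nat → Nat → Nat
  | [], _, a => a
  | m :: ms, t, a => pvFA i j k ms (t + 1)
      (if PySem.Int.bxor (PySem.Int.bxor (pvBit m i) (pvBit m j)) (pvBit m k) = 0
       then a ||| (1 <<< t) else a)

def pvBitN (m : Int) (i : Int) : Nat := (pvBit m i).toNat

-- Nat-level model of B's column accumulation
def pvColN (i : Int) : List Int → Nat → Nat → Nat
  | [], _, c => c
  | m :: ms, t, c => pvColN i ms (t + 1) (c ||| (pvBitN m i <<< t))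

lemma pvBand01 (a : Int) : PySem.Int.band a 1 = 0 ∨ PySem.Int.band a 1 = 1 := by
  have h0 := PySem.Int.band_one a
  have h1 := PySem.Int.mod_nonneg a (b := 2) (by norm_num)
  have h2 := PySem.Int.mod_lt a (b := 2) (by norm_num)
  omega

lemma pvBit01 (m b : Int) : pvBit m b = 0 ∨ pvBit m b = 1 := pvBand01 _

lemma pvCastA (i j k : Int) : ∀ (ms : List Int) (t a : Nat),
    (PySem.List.enumerate ms (t : Int)).foldl (fun b0 p =>
      if PySem.Int.bxor (PySem.Int.bxor (pvBit p.2 i) (pvBit p.2 j)) (pvBit p.2 k) = 0 then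
        PySem.Int.bor b0 (1 <<< p.1.toNat)
      else b0) (a : Int) = ((pvFA i j k ms t a : Nat) : Int) := by
  intro ms
  induction ms with
  | nil => intro t a; simp [PySem.List.enumerate_nil, pvFA]
  | cons m ms ih =>
    intro t a
    rw [PySem.List.enumerate_cons]
    simp only [List.foldl_cons, Int.toNat_natCast]
    have h1 : ((t : Int) + 1) = ((t + 1 : Nat) : Int) := by push_cast; ring
    rw [h1]
    by_cases hc : PySem.Int.bxor (PySem.Int.bxor (pvBit m i) (pvBit m j)) (pvBit m k) = 0
    · rw [if_pos hc, PySem.Int.bor_natCast, ih]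
      conv_rhs => rw [pvFA]
      rw [if_pos hc]
    · rw [if_neg hc, ih]
      conv_rhs => rw [pvFA]
      rw [if_neg hc]

lemma pvCastCol (i : Int) : ∀ (ms : List Int) (t c : Nat),
    (PySem.List.enumerate ms (t : Int)).foldl (fun c p =>
      PySem.Int.bor c ((pvBit p.2 i) <<< p.1.toNat)) (c : Int)
      = ((pvColN i ms t c : Nat) : Int) := by
  intro ms
  induction ms with
  | nil => intro t c; simp [PySem.List.enumerate_nil, pvColN]
  | cons m ms ih =>
    intro t c
    rw [PySem.List.enumerate_cons]
    simp only [List.foldl_cons, Int.toNat_natCast]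
    have h1 : ((t : Int) + 1) = ((t + 1 : Nat) : Int) := by push_cast; ring
    have hb : pvBit m i = ((pvBitN m i : Nat) : Int) := by
      rcases pvBit01 m i with h | h <;> simp [pvBitN, h]
    rw [h1, hb, Int.shiftLeft_natCast, PySem.Int.bor_natCast, ih]
    conv_rhs => rw [pvColN]

lemma pvTestBit_pvFA (i j k : Int) : ∀ (ms : List Int) (t a u : Nat),
    (pvFA i j k ms t a).testBit u =
      (a.testBit u || (decide (t ≤ u) && decide (u < t + ms.length) &&
        decide (PySem.Int.bxor (PySem.Int.bxor (pvBit (ms.getD (u - t) 0) i)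
          (pvBit (ms.getD (u - t) 0) j)) (pvBit (ms.getD (u - t) 0) k) = 0))) := by
  intro ms
  induction ms with
  | nil =>
    intro t a u
    have h2 : (decide (u < t + ([] : List Int).length)) = false ∨ (decide (t ≤ u)) = false := by
      by_cases h : t ≤ u <;> simp [h]
    rcases h2 with h | h <;> simp [pvFA, h]
  | cons m ms ih =>
    intro t a u
    rw [pvFA, ih]
    by_cases hu : u = t
    · subst hu
      have h1 : (decide (u + 1 ≤ u)) = false := by simp
      have h2 : (decide (u ≤ u)) = true := by simp
      have h3 : (decide (u < u + (m :: ms).length)) = true := by simp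
      rw [h1, h2, h3]
      simp only [Nat.sub_self, List.getD_cons_zero, Bool.false_and, Bool.or_false,
        Bool.true_and]
      by_cases hc : PySem.Int.bxor (PySem.Int.bxor (pvBit m i) (pvBit m j)) (pvBit m k) = 0
      · rw [if_pos hc]
        simp [hc, Nat.testBit_or, Nat.testBit_shiftLeft]
      · rw [if_neg hc]
        simp [hc]
    · have hsame : (if PySem.Int.bxor (PySem.Int.bxor (pvBit m i) (pvBit m j)) (pvBit m k) = 0
          then a ||| (1 <<< t) else a).testBit u = a.testBit u := by
        split
        · simp [Nat.testBit_or, Nat.testBit_shiftLeft, Nat.testBit_one_eq_true_iff_self_eq_zero]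
          omega
        · rfl
      rw [hsame]
      by_cases ht : t ≤ u
      · have htu : t < u := by omega
        have e1 : (decide (t + 1 ≤ u)) = (decide (t ≤ u)) := by simp; omega
        have e2 : (decide (u < t + 1 + ms.length)) = (decide (u < t + (m :: ms).length)) := by
          simp only [List.length_cons]; by_cases h : u < t + 1 + ms.length <;> simp [h] <;> omega
        have e3 : (m :: ms).getD (u - t) 0 = ms.getD (u - (t + 1)) 0 := by
          have hs : u - t = (u - (t + 1)) + 1 := by omega
          rw [hs, List.getD_cons_succ]
        rw [e1, e2, e3]
      · have h1 : (decide (t + 1 ≤ u)) = false := by simp; omega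
        have h2 : (decide (t ≤ u)) = false := by simp; omega
        rw [h1, h2]
        simp

lemma pvTestBit_pvColN (i : Int) : ∀ (ms : List Int) (t c u : Nat),
    (pvColN i ms t c).testBit u =
      (c.testBit u || (decide (t ≤ u) && decide (u < t + ms.length) &&
        (pvBitN (ms.getD (u - t) 0) i == 1))) := by
  intro ms
  induction ms with
  | nil =>
    intro t c u
    have h2 : (decide (u < t + ([] : List Int).length)) = false ∨ (decide (t ≤ u)) = false := by
      by_cases h : t ≤ u <;> simp [h]
    rcases h2 with h | h <;> simp [pvColN, h]
  | cons m ms ih =>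
    intro t c u
    rw [pvColN, ih]
    by_cases hu : u = t
    · subst hu
      have h1 : (decide (u + 1 ≤ u)) = false := by simp
      have h2 : (decide (u ≤ u)) = true := by simp
      have h3 : (decide (u < u + (m :: ms).length)) = true := by simp
      rw [h1, h2, h3]
      simp only [Nat.sub_self, List.getD_cons_zero, Bool.false_and, Bool.or_false,
        Bool.true_and]
      rcases pvBit01 m i with h | h <;>
        simp [Nat.testBit_or, Nat.testBit_shiftLeft, pvBitN, h]
    · have hsame : (c ||| (pvBitN m i <<< t)).testBit u = c.testBit u := by
        rcases pvBit01 m i with h | h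
        · simp [pvBitN, h]
        · simp [Nat.testBit_or, Nat.testBit_shiftLeft, pvBitN, h,
            Nat.testBit_one_eq_true_iff_self_eq_zero]
          omega
      rw [hsame]
      by_cases ht : t ≤ u
      · have e1 : (decide (t + 1 ≤ u)) = (decide (t ≤ u)) := by simp; omega
        have e2 : (decide (u < t + 1 + ms.length)) = (decide (u < t + (m :: ms).length)) := by
          simp only [List.length_cons]; by_cases h : u < t + 1 + ms.length <;> simp [h] <;> omega
        have e3 : (m :: ms).getD (u - t) 0 = ms.getD (u - (t + 1)) 0 := by
          have hs : u - t = (u - (t + 1)) + 1 := by omega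
          rw [hs, List.getD_cons_succ]
        rw [e1, e2, e3]
      · have h1 : (decide (t + 1 ≤ u)) = false := by simp; omega
        have h2 : (decide (t ≤ u)) = false := by simp; omega
        rw [h1, h2]
        simp

lemma pvKey (ms : List Int) (i j k : Int) :
    pvFA i j k ms 0 0 =
      (1 <<< ms.length - 1) ^^^ ((pvColN i ms 0 0 ^^^ pvColN j ms 0 0) ^^^ pvColN k ms 0 0) := by
  apply Nat.eq_of_testBit_eq
  intro u
  rw [pvTestBit_pvFA, Nat.testBit_xor, Nat.testBit_xor, Nat.testBit_xor,
    pvTestBit_pvColN i, pvTestBit_pvColN j, pvTestBit_pvColN k,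
    Nat.one_shiftLeft, Nat.testBit_two_pow_sub_one]
  simp only [Nat.zero_testBit, Bool.false_or, Nat.zero_add, Nat.sub_zero, Nat.zero_le,
    decide_true, Bool.true_and]
  by_cases hu : u < ms.length
  · rw [decide_eq_true hu]
    simp only [Bool.true_and, pvBitN]
    rcases pvBit01 (ms.getD u 0) i with h1 | h1 <;>
      rcases pvBit01 (ms.getD u 0) j with h2 | h2 <;>
      rcases pvBit01 (ms.getD u 0) k with h3 | h3 <;>
      simp only [h1, h2, h3] <;> decide
  · rw [decide_eq_false hu]
    simp

-- ===== VERDICT (by name: the statement is the Claim_ definition above) =====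
theorem build_triple_xor_partition_masks_spec : Claim_equal_build_triple_xor_partition_masks := by
  intro masks _hdom
  unfold Spec_build_triple_xor_partition_masks
  unfold build_triple_xor_partition_masks build_triple_xor_partition_masks_alt
  simp only [PySem.List.foldl_append_singleton_eq_map, PySem.List.foldl_append_eq_flatMap,
    List.nil_append]
  apply List.flatMap_congr
  intro i hi
  apply List.flatMap_congr
  intro j hj
  apply List.map_congr_left
  intro k hk
  obtain ⟨hi0, hi10⟩ := PySem.List.mem_pyRange_one.mp hi
  obtain ⟨hj0, hj10⟩ := PySem.List.mem_pyRange_one.mp hj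
  obtain ⟨hk0, hk10⟩ := PySem.List.mem_pyRange_one.mp hk
  rw [PySem.List.pyGetD_map_pyRange_of_nonneg _ _ _ _ hi0 hi10,
    PySem.List.pyGetD_map_pyRange_of_nonneg _ _ _ _ (by omega) hj10,
    PySem.List.pyGetD_map_pyRange_of_nonneg _ _ _ _ (by omega) hk10]
  simp only [pvPair]
  have hA : (PySem.List.enumerate masks 0).foldl (fun b0 p =>
      if PySem.Int.bxor (PySem.Int.bxor (pvBit p.2 i) (pvBit p.2 j)) (pvBit p.2 k) = 0 then
        PySem.Int.bor b0 (1 <<< p.1.toNat)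
      else b0) 0 = ((pvFA i j k masks 0 0 : Nat) : Int) := pvCastA i j k masks 0 0
  have hCol : ∀ x : Int, pvCol masks x = ((pvColN x masks 0 0 : Nat) : Int) := fun x =>
    pvCastCol x masks 0 0
  have hloc : ((1 <<< masks.length : Nat) : Int) - 1 = ((1 <<< masks.length - 1 : Nat) : Int) := by
    have h1 : 1 ≤ 1 <<< masks.length := by
      rw [Nat.one_shiftLeft]; exact Nat.one_le_two_pow
    omega
  rw [Nat.cast_one] at hloc
  rw [hCol i, hCol j, hCol k, hloc, PySem.Int.bxor_natCast, PySem.Int.bxor_natCast,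
    PySem.Int.bxor_natCast, ← pvKey masks i j k, ← hA]
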